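-- pv_equiv track=rewrite | github.com/portland-laws/portland-laws.github.io | ppd/daemon/task_board_replenishment.py | _has_selectable_task
-- ===== SOURCE A (Python) =====
-- from typing import Iterable
--
-- TASK_MARKER = "- [ ] Task "
--
-- BLOCKED_HEADING_MARKERS = (
--     "## Blocked",
--     "## Parked",
--     "## Superseded or Parked",
-- )
--
-- SECTION_HEADING_PREFIX = "## "
--
-- def _has_selectable_task(lines: Iterable[str]) -> bool:
--     blocked = False
--     for line in lines:
--         if line.startswith(SECTION_HEADING_PREFIX):
--             blocked = line.startswith(BLOCKED_HEADING_MARKERS)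
--         if not blocked and line.startswith(TASK_MARKER):
--             return True
--     return False
-- ===== SOURCE B (Python) =====
-- TASK_MARKER = "- [ ] Task "
--
-- BLOCKED_HEADING_MARKERS = (
--     "## Blocked",
--     "## Parked",
--     "## Superseded or Parked",
-- )
--
-- SECTION_HEADING_PREFIX = "## "
--
-- def _has_selectable_task(lines):
--     # Partition the lines into sections (preamble + one per heading), then
--     # check each non-blocked section for a task line.
--     sections = []
--     cur_blocked = False
--     cur = []
--     for line in lines:
--         if line.startswith(SECTION_HEADING_PREFIX):
--             sections.append((cur_blocked, cur))
--             cur_blocked = line.startswith(BLOCKED_HEADING_MARKERS)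
--             cur = []
--         cur.append(line)
--     sections.append((cur_blocked, cur))
--     return any(
--         not blocked and any(l.startswith(TASK_MARKER) for l in sec)
--         for blocked, sec in sections
--     )
-- ===== Notes on version B (the rewrite author's own statement) =====
-- stated objective: alternative
-- what changed: Replaces the single running-flag scan with a section-level decomposition: the lines are first grouped into sections at '## ' headings (the preamble is non-blocked), then each non-blocked section is searched for a task line.
import Mathlib
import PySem

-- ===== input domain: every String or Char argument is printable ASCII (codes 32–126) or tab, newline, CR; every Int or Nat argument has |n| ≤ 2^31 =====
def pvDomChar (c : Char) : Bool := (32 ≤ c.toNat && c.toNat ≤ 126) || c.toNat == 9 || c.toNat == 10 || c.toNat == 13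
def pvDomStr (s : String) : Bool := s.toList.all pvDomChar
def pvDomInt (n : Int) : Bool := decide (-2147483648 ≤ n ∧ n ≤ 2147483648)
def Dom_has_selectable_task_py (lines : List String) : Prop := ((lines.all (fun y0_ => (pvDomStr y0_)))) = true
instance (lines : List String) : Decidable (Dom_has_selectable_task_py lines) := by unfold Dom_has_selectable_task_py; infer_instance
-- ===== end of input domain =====

-- B re-implements the running-flag scan as a section-level traversal (group lines at '## ' headings, then search non-blocked sections); same results, no speed claim.

-- ===== PORT A =====
-- line.startswith(BLOCKED_HEADING_MARKERS) — a tuple argument means "any of these prefixes"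
def pvBlockedHeading (line : String) : Bool :=
  PySem.Str.startswith line "## Blocked" || PySem.Str.startswith line "## Parked" ||
    PySem.Str.startswith line "## Superseded or Parked"

def pvAGo : List String → Bool → Bool
  | [], _ => false
  | line :: ls, blocked =>
    let blocked := if PySem.Str.startswith line "## " then pvBlockedHeading line else blocked
    if !blocked && PySem.Str.startswith line "- [ ] Task " then true else pvAGo ls blocked

def has_selectable_task_py (lines : List String) : Bool := pvAGo lines false

-- ===== PORT B =====
-- build the list of (blocked, section-lines) pairs; cur is appended to, as in Source B
def pvSectionsGo : List String → Bool → List String → List (Bool × List String)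
  | [], curBlocked, cur => [(curBlocked, cur)]
  | line :: ls, curBlocked, cur =>
    if PySem.Str.startswith line "## " then
      (curBlocked, cur) :: pvSectionsGo ls (pvBlockedHeading line) [line]
    else
      pvSectionsGo ls curBlocked (cur ++ [line])

def has_selectable_task_py_alt (lines : List String) : Bool :=
  (pvSectionsGo lines false []).any
    (fun sec => !sec.1 && sec.2.any (fun l => PySem.Str.startswith l "- [ ] Task "))

-- ===== PRECONDITION & SPEC =====
def Spec_has_selectable_task_py (lines : List String) (out : Bool) : Prop := out = has_selectable_task_py_alt lines
instance (lines : List String) (out : Bool) : Decidable (Spec_has_selectable_task_py lines out) := by unfold Spec_has_selectable_task_py; infer_instance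

-- ===== CLAIM (what is proved, stated in full; the proofs are below) =====
def Claim_equal_has_selectable_task_py : Prop := ∀ (lines : List String), Dom_has_selectable_task_py lines → Spec_has_selectable_task_py lines (has_selectable_task_py lines)

-- ===== LEMMAS AND PROOFS =====

-- a '## ' heading line can never itself be a task line (the prefixes clash at the first char)
theorem pv_heading_not_task (l : String)
    (h : PySem.Str.startswith l "## " = true) :
    PySem.Str.startswith l "- [ ] Task " = false := by
  simp only [PySem.Str.startswith_eq] at *
  rw [PySem.Chars.startswith_iff] at h
  rcases h with ⟨t, ht⟩
  by_contra hc
  rw [Bool.not_eq_false, PySem.Chars.startswith_iff] at hc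
  rcases hc with ⟨t', ht'⟩
  rw [← ht] at ht'
  simp at ht'

theorem pv_key (ls : List String) (cb : Bool) (cur : List String) :
    (pvSectionsGo ls cb cur).any
        (fun sec => !sec.1 && sec.2.any (fun l => PySem.Str.startswith l "- [ ] Task "))
      = ((!cb && cur.any (fun l => PySem.Str.startswith l "- [ ] Task ")) || pvAGo ls cb) := by
  induction ls generalizing cb cur with
  | nil => simp [pvSectionsGo, pvAGo]
  | cons line ls ih =>
    by_cases hh : PySem.Str.startswith line "## " = true
    · have hnt := pv_heading_not_task line hh
      simp at hh hnt ih
      simp [pvSectionsGo, pvAGo, hh, hnt]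
      cases hb : pvBlockedHeading line
      · rw [ih.1]
        simp [hnt]
      · rw [ih.2]
    · cases hct : PySem.Str.startswith line "- [ ] Task "
      all_goals simp at hh hct ih
      all_goals cases cb <;> simp [pvSectionsGo, pvAGo, hh, hct, ih]

-- ===== VERDICT (by name: the statement is the Claim_ definition above) =====
theorem has_selectable_task_py_spec : Claim_equal_has_selectable_task_py := by
  intro lines _
  unfold Spec_has_selectable_task_py has_selectable_task_py has_selectable_task_py_alt
  rw [pv_key]
  simp
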